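-- pv_equiv track=rewrite | github.com/FotonPC/schools_lessons_informatic9 | dz_peredvod.py | format_out
-- ===== SOURCE A (Python) =====
-- def format_out(s, base=10):
--     res = ""
--     if base == 2:
--         if len(s) > 4:
--             while len(s) > 4:
--                 res = s[-4::] + ' ' + res
--                 s = s[:-4:]
--             res = s + ' ' + res
--             # res = res[:-2:]
--         else:
--             res = s
--     elif base == 10:
--         if len(s) > 3:
--             while len(s) > 3:
--                 res = s[-3::] + ' ' + res
--                 s = s[:-3:]
--             res = s + ' ' + res
--             # res = res[:-2:]
--         else:
--             res = s
--     elif base == 16: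
--         if len(s) > 2:
--             while len(s) > 2:
--                 res = s[-2::] + ' ' + res
--                 s = s[:-2:]
--             res = s + ' ' + res
--             # res = res[:-2:]
--         else:
--             res = s
--     else:
--         res = s
--     return res.strip()
-- ===== SOURCE B (Python) =====
-- def format_out(s, base=10):
--     w = {2: 4, 10: 3, 16: 2}.get(base)
--     if w is None or len(s) <= w:
--         return s.strip()
--     first = len(s) % w
--     chunks = [s[:first]] if first else []
--     for i in range(first, len(s), w):
--         chunks.append(s[i:i + w])
--     return ' '.join(chunks).strip()
-- ===== Notes on version B (the rewrite author's own statement) =====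
-- stated objective: alternative
-- what changed: A builds the result right-to-left by repeatedly slicing off the last w characters in a while loop and prepending them with string concatenation; B computes the leading-chunk length as len(s) mod w once, partitions the string left-to-right with a forward w-stride index loop, and joins the chunks with a single space-separated join.
import Mathlib
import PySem

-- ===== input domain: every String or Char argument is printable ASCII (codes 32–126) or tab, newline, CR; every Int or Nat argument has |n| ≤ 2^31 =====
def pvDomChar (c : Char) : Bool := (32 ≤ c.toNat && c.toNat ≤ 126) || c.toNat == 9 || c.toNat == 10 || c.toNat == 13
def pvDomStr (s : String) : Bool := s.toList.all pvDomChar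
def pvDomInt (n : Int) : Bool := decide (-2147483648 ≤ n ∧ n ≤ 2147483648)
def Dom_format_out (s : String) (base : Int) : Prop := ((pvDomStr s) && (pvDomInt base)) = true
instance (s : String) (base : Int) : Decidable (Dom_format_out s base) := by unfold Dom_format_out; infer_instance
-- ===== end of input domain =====

-- B replaces A's right-to-left while loop (repeated prepend of the last w characters) by a
-- modulo-computed leading chunk plus a forward w-stride partition joined with ' ' (objective: alternative decomposition).

-- ===== PORT A =====
-- the while loop fused with the following `res = s + ' ' + res` line: while len(s) > w, prepend
-- s[-w:] + ' '; Python's s[-w::] = drop (len-w) and s[:-w:] = take (len-w), exact since w < len here.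
-- (the `0 < w` conjunct is a totality guard only: A calls this with w = 4, 3 or 2)
def fmtLoopA (w : Nat) (s res : List Char) : List Char :=
  if h : w < s.length ∧ 0 < w then
    fmtLoopA w (s.take (s.length - w)) (s.drop (s.length - w) ++ ' ' :: res)
  else s ++ ' ' :: res
termination_by s.length
decreasing_by simp; omega

def format_out (s : String) (base : Int) : String :=
  let cs := s.toList
  let res : List Char :=
    if base = 2 then (if 4 < cs.length then fmtLoopA 4 cs [] else cs)
    else if base = 10 then (if 3 < cs.length then fmtLoopA 3 cs [] else cs)
    else if base = 16 then (if 2 < cs.length then fmtLoopA 2 cs [] else cs)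
    else cs
  String.mk (PySem.Chars.strip res)

-- ===== PORT B =====
-- ' '.join
def joinSp : List (List Char) → List Char
  | [] => []
  | [c] => c
  | c :: d :: rest => c ++ ' ' :: joinSp (d :: rest)

-- the for loop `for i in range(first, len(s), w): chunks.append(s[i:i+w])`; s[i:i+w] = (drop i).take w
-- (the `0 < w` conjunct is a totality guard only: B calls this with w = 4, 3 or 2)
def fmtChunks (w : Nat) (cs : List Char) (i : Nat) : List (List Char) :=
  if h : i < cs.length ∧ 0 < w then ((cs.drop i).take w) :: fmtChunks w cs (i + w)
  else []
termination_by cs.length - i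
decreasing_by omega

-- chunks = ([s[:first]] if first else []) + the loop's appends, first = len(s) % w
def fmtChunksAll (w : Nat) (cs : List Char) : List (List Char) :=
  (if cs.length % w ≠ 0 then [cs.take (cs.length % w)] else []) ++ fmtChunks w cs (cs.length % w)

def format_out_alt (s : String) (base : Int) : String :=
  let cs := s.toList
  let w? : Option Nat := if base = 2 then some 4 else if base = 10 then some 3 else if base = 16 then some 2 else none
  match w? with
  | none => String.mk (PySem.Chars.strip cs)
  | some w =>
    if cs.length ≤ w then String.mk (PySem.Chars.strip cs)
    else String.mk (PySem.Chars.strip (joinSp (fmtChunksAll w cs)))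

-- ===== PRECONDITION & SPEC =====
def Spec_format_out (s : String) (base : Int) (out : String) : Prop := out = format_out_alt s base
instance (s : String) (base : Int) (out : String) : Decidable (Spec_format_out s base out) := by unfold Spec_format_out; infer_instance

-- ===== CLAIM (what is proved, stated in full; the proofs are below) =====
def Claim_equal_format_out : Prop := ∀ (s : String) (base : Int), Dom_format_out s base → Spec_format_out s base (format_out s base)

-- ===== LEMMAS AND PROOFS =====

lemma strip_append_space (x : List Char) :
    PySem.Chars.strip (x ++ [' ']) = PySem.Chars.strip x := by
  unfold PySem.Chars.strip PySem.Chars.lstrip PySem.Chars.rstrip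
  rw [List.dropWhile_append]
  have hsp : PySem.Chars.isspace ' ' = true := by decide
  by_cases h : (List.dropWhile PySem.Chars.isspace x).isEmpty
  · have hx : List.dropWhile PySem.Chars.isspace x = [] := by
      simpa [List.isEmpty_iff] using h
    simp [h, hx, List.dropWhile, hsp]
  · simp [h, List.reverse_append, List.dropWhile, hsp]

lemma fmtChunks_split (w m : Nat) (cs : List Char) (hw : 0 < w)
    (hm : m = cs.length - w) (hlt : w < cs.length) :
    ∀ q i, i + q * w = m →
      fmtChunks w cs i = fmtChunks w (cs.take m) i ++ [cs.drop m] := by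
  intro q
  induction q with
  | zero =>
      intro i hi
      have hi' : i = m := by omega
      rw [hi']
      have h1 : m < cs.length := by omega
      have h2 : ¬ (m + w < cs.length ∧ 0 < w) := by omega
      have h3 : ¬ (m < (cs.take m).length ∧ 0 < w) := by
        simp only [List.length_take]; omega
      rw [fmtChunks, dif_pos ⟨h1, hw⟩]
      rw [fmtChunks, dif_neg h2]
      rw [fmtChunks, dif_neg h3]
      have : (cs.drop m).take w = cs.drop m :=
        List.take_of_length_le (by simp only [List.length_drop]; omega)
      simp [this]
  | succ q ih =>
      intro i hi
      have hiw : i + w + q * w = m := by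
        have : (q + 1) * w = q * w + w := by ring
        omega
      have him : i < m := by
        have : 0 < (q + 1) * w := by positivity
        omega
      rw [fmtChunks]
      conv_rhs => rw [fmtChunks]
      have h1 : i < cs.length := by omega
      have h2 : i < (cs.take m).length ∧ 0 < w := by
        constructor
        · simp; omega
        · exact hw
      rw [dif_pos ⟨h1, hw⟩, dif_pos h2]
      have hchunk : ((cs.take m).drop i).take w = (cs.drop i).take w := by
        rw [List.drop_take, List.take_take]
        congr 1
        omega
      rw [hchunk, ih (i + w) hiw]
      simp

lemma chunksAll_split (w : Nat) (cs : List Char) (hw : 0 < w) (hlt : w < cs.length) :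
    fmtChunksAll w cs = fmtChunksAll w (cs.take (cs.length - w)) ++ [cs.drop (cs.length - w)] := by
  set m := cs.length - w with hm
  have hlen : (cs.take m).length = m := by simp only [List.length_take]; omega
  have hc : cs.length = m + w := by omega
  have hf : cs.length % w = m % w := by rw [hc, Nat.add_mod_right]
  have hmod : (cs.take m).length % w = cs.length % w := by rw [hlen, hf]
  have hfle : cs.length % w ≤ m := by
    rw [hf]; exact Nat.mod_le _ _
  unfold fmtChunksAll
  rw [hmod]
  have hpre : (cs.take m).take (cs.length % w) = cs.take (cs.length % w) := by
    rw [List.take_take]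
    congr 1
    omega
  rw [hpre]
  have hsub : m - m % w = w * (m / w) := by
    have := Nat.div_add_mod m w
    omega
  have hq : cs.length % w + ((m - cs.length % w) / w) * w = m := by
    rw [hf, hsub, Nat.mul_div_cancel_left _ hw]
    exact Nat.mod_add_div' m w
  rw [fmtChunks_split w m cs hw hm hlt ((m - cs.length % w) / w) (cs.length % w) hq]
  simp [List.append_assoc]

lemma chunksAll_short (w : Nat) (cs : List Char) (hw : 0 < w)
    (h0 : 0 < cs.length) (hle : cs.length ≤ w) : fmtChunksAll w cs = [cs] := by
  unfold fmtChunksAll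
  rcases eq_or_lt_of_le hle with heq | hlt
  · have hmod : cs.length % w = 0 := by rw [heq, Nat.mod_self]
    rw [hmod]
    rw [fmtChunks, fmtChunks]
    rw [dif_pos ⟨h0, hw⟩, dif_neg (by omega)]
    simp [List.take_of_length_le hle]
  · have hmod : cs.length % w = cs.length := Nat.mod_eq_of_lt hlt
    rw [hmod]
    rw [fmtChunks, dif_neg (by omega)]
    simp [List.take_of_length_le (le_refl _), h0.ne']

lemma chunksAll_ne_nil (w : Nat) (cs : List Char) (hw : 0 < w) (h0 : 0 < cs.length) :
    fmtChunksAll w cs ≠ [] := by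
  unfold fmtChunksAll
  by_cases hf : cs.length % w = 0
  · rw [hf]
    rw [fmtChunks, dif_pos ⟨h0, hw⟩]
    simp
  · simp [hf]

lemma joinSp_append (xs : List (List Char)) (y : List Char) (h : xs ≠ []) :
    joinSp (xs ++ [y]) = joinSp xs ++ ' ' :: y := by
  induction xs with
  | nil => exact absurd rfl h
  | cons x xs ih =>
      cases xs with
      | nil => simp [joinSp]
      | cons z zs =>
          have := ih (by simp)
          simp only [List.cons_append] at this ⊢
          rw [joinSp, this]
          simp [joinSp]

lemma loop_eq (w : Nat) (hw : 0 < w) :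
    ∀ (n : Nat) (cs res : List Char), cs.length = n → 0 < cs.length →
      fmtLoopA w cs res = joinSp (fmtChunksAll w cs) ++ ' ' :: res := by
  intro n
  induction n using Nat.strong_induction_on with
  | _ n ih =>
      intro cs res hn h0
      rw [fmtLoopA]
      by_cases hlt : w < cs.length ∧ 0 < w
      · rw [dif_pos hlt]
        have hlen : (cs.take (cs.length - w)).length = cs.length - w := by
          simp only [List.length_take]; omega
        have := ih (cs.length - w) (by omega) (cs.take (cs.length - w))
          (cs.drop (cs.length - w) ++ ' ' :: res) hlen (by omega)
        rw [this, chunksAll_split w cs hw hlt.1,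
            joinSp_append _ _ (chunksAll_ne_nil w _ hw (by simp only [List.length_take]; omega))]
        simp
      · rw [dif_neg hlt]
        have hle : cs.length ≤ w := by omega
        rw [chunksAll_short w cs hw h0 hle]
        simp [joinSp]

lemma case_w (w : Nat) (hw : 0 < w) (cs : List Char) :
    String.mk (PySem.Chars.strip (if w < cs.length then fmtLoopA w cs [] else cs)) =
      if cs.length ≤ w then String.mk (PySem.Chars.strip cs)
      else String.mk (PySem.Chars.strip (joinSp (fmtChunksAll w cs))) := by
  by_cases h : w < cs.length
  · rw [if_pos h, if_neg (by omega)]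
    rw [loop_eq w hw cs.length cs [] rfl (by omega)]
    rw [strip_append_space]
  · rw [if_neg h, if_pos (by omega)]

lemma main_eq (s : String) (base : Int) : format_out s base = format_out_alt s base := by
  unfold format_out format_out_alt
  by_cases h2 : base = 2
  · simp only [h2, if_pos rfl]
    exact case_w 4 (by norm_num) s.toList
  · by_cases h10 : base = 10
    · simp only [h2, h10, if_neg, if_pos rfl, reduceIte]
      exact case_w 3 (by norm_num) s.toList
    · by_cases h16 : base = 16
      · simp only [h2, h10, h16, if_neg, if_pos rfl, reduceIte]
        exact case_w 2 (by norm_num) s.toList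
      · simp only [if_neg h2, if_neg h10, if_neg h16]

-- ===== VERDICT (by name: the statement is the Claim_ definition above) =====
theorem format_out_spec : Claim_equal_format_out := by
  intro s base _
  exact main_eq s base
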